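-- pv_equiv track=rewrite | github.com/fkguo/autoresearch-lab | skills/research-team/scripts/lib/md_utils.py | iter_inline_code_spans
-- ===== SOURCE A (Python) =====
-- def iter_inline_code_spans(line: str) -> list[tuple[int, int, str, str]]:
--     """
--     Return (start, end, content, delim) for inline code spans, supporting variable-length backtick delimiters.
--
--     Notes / limitations (preserved from the prior duplicated implementations):
--     - Does not attempt to interpret escaped backticks (\\`) or HTML entities.
--     - Unclosed spans are ignored (treated as normal text).
--     """
--     spans: list[tuple[int, int, str, str]] = []
--     i = 0
--     n = len(line)
--     while i < n:
--         if line[i] != "`":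
--             i += 1
--             continue
--         j = i
--         while j < n and line[j] == "`":
--             j += 1
--         delim = line[i:j]
--         k = j
--         while k < n:
--             if line[k] != "`":
--                 k += 1
--                 continue
--             r = k
--             while r < n and line[r] == "`":
--                 r += 1
--             if line[k:r] == delim:
--                 spans.append((i, r, line[j:k], delim))
--                 i = r
--                 break
--             k = r
--         else:
--             i = j
--     return spans
-- ===== SOURCE B (Python) =====
-- def iter_inline_code_spans(line: str) -> list[tuple[int, int, str, str]]:
--     """Run-based re-implementation: tokenize the backtick runs once, then match
--     each opener run against the first later run of equal length."""
--     n = len(line)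
--     # one pass: collect maximal backtick runs as (start, end)
--     runs: list[tuple[int, int]] = []
--     idx = 0
--     while idx < n:
--         if line[idx] == "`":
--             j = idx + 1
--             while j < n and line[j] == "`":
--                 j += 1
--             runs.append((idx, j))
--             idx = j
--         else:
--             idx += 1
--     out: list[tuple[int, int, str, str]] = []
--     k = len(runs)
--     t = 0
--     while t < k:
--         s, e = runs[t]
--         length = e - s
--         m = t + 1
--         while m < k and runs[m][1] - runs[m][0] != length:
--             m += 1
--         if m < k:
--             s2, e2 = runs[m]
--             out.append((s, e2, line[e:s2], line[s:e]))
--             t = m + 1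
--         else:
--             t += 1
--     return out
-- ===== Notes on version B (the rewrite author's own statement) =====
-- stated objective: alternative
-- what changed: A rescans characters with nested while-loops (for every opener it re-walks the rest of the line char by char); B tokenizes the line once into maximal backtick runs and then matches each opener run against the first later run of equal length at the run level.
import Mathlib
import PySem

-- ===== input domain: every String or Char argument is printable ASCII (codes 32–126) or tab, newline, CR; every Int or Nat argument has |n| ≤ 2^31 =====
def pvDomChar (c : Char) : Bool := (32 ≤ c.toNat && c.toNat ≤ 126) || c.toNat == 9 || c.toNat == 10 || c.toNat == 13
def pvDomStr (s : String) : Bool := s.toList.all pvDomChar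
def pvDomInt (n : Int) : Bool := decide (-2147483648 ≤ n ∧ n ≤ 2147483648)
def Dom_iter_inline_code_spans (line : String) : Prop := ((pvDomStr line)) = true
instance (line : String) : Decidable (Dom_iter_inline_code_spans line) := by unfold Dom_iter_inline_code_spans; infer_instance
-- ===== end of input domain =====

-- B replaces A's nested character-level rescanning with a single tokenization of the
-- backtick runs followed by run-level matching (objective: alternative algorithm).
-- Loops are ported as structural recursion on a fuel argument that is always
-- sufficient (each iteration advances the index), so fuel never changes the result.

-- ===== PORT A =====
-- line[a:b] for the 0 ≤ a ≤ b ≤ len(line) indices both programs use; exact there.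
def pvSlice (cs : List Char) (a b : Nat) : List Char := (cs.drop a).take (b - a)

/-- A's `while j < n and line[j] == '`': j += 1` run scan (used for `j` and `r`). -/
def pvRunEndA : Nat → List Char → Nat → Nat
  | 0, _, k => k
  | fuel + 1, cs, k =>
    if h : k < cs.length then
      if cs[k] = '`' then pvRunEndA fuel cs (k + 1) else k
    else k

/-- A's inner `while k < n: … else:` search loop; `some (r, span)` models the `break`
    with the span appended and `i = r`, `none` models falling through to `i = j`. -/
def pvFind : Nat → List Char → List Char → Nat → Nat → Nat →
    Option (Nat × (Int × Int × String × String))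
  | 0, _, _, _, _, _ => none
  | fuel + 1, cs, delim, i, j, k =>
    if h : k < cs.length then
      if cs[k] ≠ '`' then pvFind fuel cs delim i j (k + 1)
      else
        if pvSlice cs k (pvRunEndA cs.length cs k) = delim then
          some (pvRunEndA cs.length cs k,
            ((i : Int), ((pvRunEndA cs.length cs k : Nat) : Int),
              String.ofList (pvSlice cs j k), String.ofList delim))
        else pvFind fuel cs delim i j (pvRunEndA cs.length cs k)
    else none

/-- A's outer `while i < n` loop. -/
def pvScanA : Nat → List Char → Nat → List (Int × Int × String × String)
  | 0, _, _ => []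
  | fuel + 1, cs, i =>
    if h : i < cs.length then
      if cs[i] ≠ '`' then pvScanA fuel cs (i + 1)
      else
        match pvFind cs.length cs (pvSlice cs i (pvRunEndA cs.length cs i)) i
            (pvRunEndA cs.length cs i) (pvRunEndA cs.length cs i) with
        | some (r, sp) => sp :: pvScanA fuel cs r
        | none => pvScanA fuel cs (pvRunEndA cs.length cs i)
    else []

def iter_inline_code_spans (line : String) : List (Int × Int × String × String) :=
  pvScanA line.toList.length line.toList 0

-- ===== PORT B =====
/-- B's `while j < n and line[j] == '`': j += 1` scan inside the tokenizer. -/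
def pvRunEndB : Nat → List Char → Nat → Nat
  | 0, _, j => j
  | fuel + 1, cs, j =>
    if h : j < cs.length then
      if cs[j] = '`' then pvRunEndB fuel cs (j + 1) else j
    else j

/-- B's first loop: one pass collecting the maximal backtick runs as (start, end). -/
def pvRunsB : Nat → List Char → Nat → List (Nat × Nat)
  | 0, _, _ => []
  | fuel + 1, cs, idx =>
    if h : idx < cs.length then
      if cs[idx] = '`' then
        (idx, pvRunEndB cs.length cs (idx + 1)) :: pvRunsB fuel cs (pvRunEndB cs.length cs (idx + 1))
      else pvRunsB fuel cs (idx + 1)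
    else []

/-- B's inner `while m < k and … != length` scan over the remaining runs:
    first later run of the given length together with the runs after it. -/
def pvSearchB (L : Nat) : List (Nat × Nat) → Option ((Nat × Nat) × List (Nat × Nat))
  | [] => none
  | (s2, e2) :: rs => if e2 - s2 ≠ L then pvSearchB L rs else some ((s2, e2), rs)

/-- B's second loop: walk the run list, matching each opener against the first
    later run of equal length. -/
def pvMatchB : Nat → List Char → List (Nat × Nat) → List (Int × Int × String × String)
  | 0, _, _ => []
  | _ + 1, _, [] => []
  | fuel + 1, cs, (s, e) :: rest =>
    match pvSearchB (e - s) rest with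
    | some ((s2, e2), rs) =>
        ((s : Int), (e2 : Int), String.ofList (pvSlice cs e s2), String.ofList (pvSlice cs s e))
          :: pvMatchB fuel cs rs
    | none => pvMatchB fuel cs rest

def iter_inline_code_spans_alt (line : String) : List (Int × Int × String × String) :=
  pvMatchB (pvRunsB line.toList.length line.toList 0).length line.toList
    (pvRunsB line.toList.length line.toList 0)

-- ===== PRECONDITION & SPEC =====
def Spec_iter_inline_code_spans (line : String) (out : List (Int × Int × String × String)) : Prop := out = iter_inline_code_spans_alt line
instance (line : String) (out : List (Int × Int × String × String)) : Decidable (Spec_iter_inline_code_spans line out) := by unfold Spec_iter_inline_code_spans; infer_instance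

-- ===== CLAIM (what is proved, stated in full; the proofs are below) =====
def Claim_equal_iter_inline_code_spans : Prop := ∀ (line : String), Dom_iter_inline_code_spans line → Spec_iter_inline_code_spans line (iter_inline_code_spans line)

-- ===== LEMMAS AND PROOFS =====

theorem pvRunEndA_ge (cs : List Char) : ∀ (f k : Nat), k ≤ pvRunEndA f cs k := by
  intro f
  induction f with
  | zero => intro k; exact le_refl k
  | succ f ih =>
    intro k
    simp only [pvRunEndA]
    split
    · split
      · exact le_trans (Nat.le_succ k) (ih (k + 1))
      · exact le_refl k
    · exact le_refl k

theorem pvRunEndA_stop (cs : List Char) (k : Nat) (hk : ¬ k < cs.length) (f : Nat) :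
    pvRunEndA f cs k = k := by
  cases f with
  | zero => rfl
  | succ f => simp [pvRunEndA, hk]

theorem pvRunEndA_irrel (cs : List Char) : ∀ (f1 f2 k : Nat),
    cs.length - k ≤ f1 → cs.length - k ≤ f2 → pvRunEndA f1 cs k = pvRunEndA f2 cs k := by
  intro f1
  induction f1 with
  | zero =>
    intro f2 k h1 _
    have hk : ¬ k < cs.length := by omega
    rw [pvRunEndA_stop cs k hk, pvRunEndA_stop cs k hk]
  | succ f1 ih =>
    intro f2 k h1 h2
    by_cases hk : k < cs.length
    · obtain ⟨f2', rfl⟩ : ∃ m, f2 = m + 1 := ⟨f2 - 1, by omega⟩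
      simp only [pvRunEndA, dif_pos hk]
      by_cases hc : cs[k]'hk = '`'
      · simp only [if_pos hc]
        exact ih f2' (k + 1) (by omega) (by omega)
      · simp only [if_neg hc]
    · rw [pvRunEndA_stop cs k hk, pvRunEndA_stop cs k hk]

theorem pvRunEndA_cstep (cs : List Char) (k : Nat) :
    pvRunEndA cs.length cs k
      = if h : k < cs.length then
          (if cs[k] = '`' then pvRunEndA cs.length cs (k + 1) else k)
        else k := by
  by_cases hk : k < cs.length
  · have h1 : pvRunEndA cs.length cs k = pvRunEndA ((cs.length - 1) + 1) cs k :=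
      pvRunEndA_irrel cs cs.length ((cs.length - 1) + 1) k (by omega) (by omega)
    rw [h1]
    simp only [pvRunEndA, dif_pos hk]
    by_cases hc : cs[k]'hk = '`'
    · simp only [if_pos hc]
      exact pvRunEndA_irrel cs (cs.length - 1) cs.length (k + 1) (by omega) (by omega)
    · simp only [if_neg hc]
  · rw [pvRunEndA_stop cs k hk, dif_neg hk]

theorem pvRunEndA_gt (cs : List Char) (k : Nat) (h : k < cs.length) (hc : cs[k] = '`') :
    k < pvRunEndA cs.length cs k := by
  rw [pvRunEndA_cstep, dif_pos h, if_pos hc]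
  have := pvRunEndA_ge cs cs.length (k + 1)
  omega

theorem pvRunEndA_step (cs : List Char) (k : Nat) (h : k < cs.length) (hc : cs[k] = '`') :
    pvRunEndA cs.length cs k = pvRunEndA cs.length cs (k + 1) := by
  rw [pvRunEndA_cstep, dif_pos h, if_pos hc]

theorem pvRunEndB_eq (cs : List Char) : ∀ (f k : Nat), pvRunEndB f cs k = pvRunEndA f cs k := by
  intro f
  induction f with
  | zero => intro k; rfl
  | succ f ih =>
    intro k
    simp only [pvRunEndA, pvRunEndB]
    split
    · split
      · exact ih (k + 1)
      · rfl
    · rfl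

theorem pvSlice_runEnd (cs : List Char) : ∀ (d k : Nat), cs.length - k ≤ d →
    pvSlice cs k (pvRunEndA cs.length cs k)
      = List.replicate (pvRunEndA cs.length cs k - k) '`' := by
  intro d
  induction d with
  | zero =>
    intro k hk
    have h : ¬ k < cs.length := by omega
    rw [pvRunEndA_cstep, dif_neg h]
    simp [pvSlice]
  | succ d ih =>
    intro k hk
    by_cases h : k < cs.length
    · by_cases hc : cs[k]'h = '`'
      · have hstep : pvRunEndA cs.length cs k = pvRunEndA cs.length cs (k + 1) :=
          pvRunEndA_step cs k h hc
        have hge := pvRunEndA_ge cs cs.length (k + 1)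
        have hdrop : cs.drop k = cs[k] :: cs.drop (k + 1) := List.drop_eq_getElem_cons h
        have hsub : pvRunEndA cs.length cs (k + 1) - k
            = (pvRunEndA cs.length cs (k + 1) - (k + 1)) + 1 := by omega
        have ih' := ih (k + 1) (by omega)
        unfold pvSlice at ih' ⊢
        rw [hstep, hdrop, hc, hsub, List.take_succ_cons, ih', ← List.replicate_succ]
      · rw [pvRunEndA_cstep, dif_pos h, if_neg hc]
        simp [pvSlice]
    · rw [pvRunEndA_cstep, dif_neg h]
      simp [pvSlice]

theorem pvReplicate_inj (m p : Nat) (c : Char) :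
    List.replicate m c = List.replicate p c ↔ m = p := by
  constructor
  · intro h
    have := congrArg List.length h
    simpa using this
  · intro h; rw [h]

theorem pvFind_stop (cs delim : List Char) (i j k : Nat) (hk : ¬ k < cs.length) (f : Nat) :
    pvFind f cs delim i j k = none := by
  cases f with
  | zero => rfl
  | succ f => simp [pvFind, hk]

theorem pvFind_irrel (cs delim : List Char) (i j : Nat) : ∀ (f1 f2 k : Nat),
    cs.length - k ≤ f1 → cs.length - k ≤ f2 →
    pvFind f1 cs delim i j k = pvFind f2 cs delim i j k := by
  intro f1
  induction f1 with
  | zero =>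
    intro f2 k h1 _
    have hk : ¬ k < cs.length := by omega
    rw [pvFind_stop cs delim i j k hk, pvFind_stop cs delim i j k hk]
  | succ f1 ih =>
    intro f2 k h1 h2
    by_cases hk : k < cs.length
    · obtain ⟨f2', rfl⟩ : ∃ m, f2 = m + 1 := ⟨f2 - 1, by omega⟩
      simp only [pvFind, dif_pos hk]
      by_cases hc : cs[k]'hk = '`'
      · have hcc : ¬ (cs[k]'hk ≠ '`') := by simpa using hc
        simp only [if_neg hcc]
        have hgt := pvRunEndA_gt cs k hk hc
        by_cases hsl : pvSlice cs k (pvRunEndA cs.length cs k) = delim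
        · simp only [if_pos hsl]
        · simp only [if_neg hsl]
          exact ih f2' (pvRunEndA cs.length cs k) (by omega) (by omega)
      · have hcc : cs[k]'hk ≠ '`' := by simpa using hc
        simp only [if_pos hcc]
        exact ih f2' (k + 1) (by omega) (by omega)
    · rw [pvFind_stop cs delim i j k hk, pvFind_stop cs delim i j k hk]

theorem pvFind_cstep (cs delim : List Char) (i j k : Nat) :
    pvFind cs.length cs delim i j k
      = if h : k < cs.length then
          (if cs[k] ≠ '`' then pvFind cs.length cs delim i j (k + 1)
           else
             if pvSlice cs k (pvRunEndA cs.length cs k) = delim then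
               some (pvRunEndA cs.length cs k,
                 ((i : Int), ((pvRunEndA cs.length cs k : Nat) : Int),
                   String.ofList (pvSlice cs j k), String.ofList delim))
             else pvFind cs.length cs delim i j (pvRunEndA cs.length cs k))
        else none := by
  by_cases hk : k < cs.length
  · have h1 : pvFind cs.length cs delim i j k = pvFind ((cs.length - 1) + 1) cs delim i j k :=
      pvFind_irrel cs delim i j cs.length ((cs.length - 1) + 1) k (by omega) (by omega)
    rw [h1]
    simp only [pvFind, dif_pos hk]
    by_cases hc : cs[k]'hk = '`'
    · have hcc : ¬ (cs[k]'hk ≠ '`') := by simpa using hc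
      simp only [if_neg hcc]
      have hgt := pvRunEndA_gt cs k hk hc
      by_cases hsl : pvSlice cs k (pvRunEndA cs.length cs k) = delim
      · simp only [if_pos hsl]
      · simp only [if_neg hsl]
        exact pvFind_irrel cs delim i j (cs.length - 1) cs.length
          (pvRunEndA cs.length cs k) (by omega) (by omega)
    · have hcc : cs[k]'hk ≠ '`' := by simpa using hc
      simp only [if_pos hcc]
      exact pvFind_irrel cs delim i j (cs.length - 1) cs.length (k + 1) (by omega) (by omega)
  · rw [pvFind_stop cs delim i j k hk, dif_neg hk]

theorem pvFind_gt (cs delim : List Char) (i j : Nat) : ∀ (d k r : Nat)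
    (sp : Int × Int × String × String), cs.length - k ≤ d →
    pvFind cs.length cs delim i j k = some (r, sp) → k < r := by
  intro d
  induction d with
  | zero =>
    intro k r sp hk hf
    rw [pvFind_stop cs delim i j k (by omega)] at hf
    simp at hf
  | succ d ih =>
    intro k r sp hk hf
    rw [pvFind_cstep] at hf
    by_cases h : k < cs.length
    · rw [dif_pos h] at hf
      by_cases hc : cs[k]'h = '`'
      · rw [if_neg (show ¬ (cs[k]'h ≠ '`') from by simpa using hc)] at hf
        have hgt := pvRunEndA_gt cs k h hc
        by_cases hsl : pvSlice cs k (pvRunEndA cs.length cs k) = delim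
        · rw [if_pos hsl] at hf
          simp only [Option.some.injEq, Prod.mk.injEq] at hf
          omega
        · rw [if_neg hsl] at hf
          have := ih (pvRunEndA cs.length cs k) r sp (by omega) hf
          omega
      · rw [if_pos (show cs[k]'h ≠ '`' from by simpa using hc)] at hf
        have := ih (k + 1) r sp (by omega) hf
        omega
    · rw [dif_neg h] at hf
      simp at hf

theorem pvRunsB_stop (cs : List Char) (k : Nat) (hk : ¬ k < cs.length) (f : Nat) :
    pvRunsB f cs k = [] := by
  cases f with
  | zero => rfl
  | succ f => simp [pvRunsB, hk]

theorem pvRunsB_irrel (cs : List Char) : ∀ (f1 f2 k : Nat),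
    cs.length - k ≤ f1 → cs.length - k ≤ f2 → pvRunsB f1 cs k = pvRunsB f2 cs k := by
  intro f1
  induction f1 with
  | zero =>
    intro f2 k h1 _
    have hk : ¬ k < cs.length := by omega
    rw [pvRunsB_stop cs k hk, pvRunsB_stop cs k hk]
  | succ f1 ih =>
    intro f2 k h1 h2
    by_cases hk : k < cs.length
    · obtain ⟨f2', rfl⟩ : ∃ m, f2 = m + 1 := ⟨f2 - 1, by omega⟩
      simp only [pvRunsB, dif_pos hk]
      by_cases hc : cs[k]'hk = '`'
      · simp only [if_pos hc]
        have hge : k + 1 ≤ pvRunEndB cs.length cs (k + 1) := by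
          rw [pvRunEndB_eq]; exact pvRunEndA_ge cs cs.length (k + 1)
        rw [ih f2' (pvRunEndB cs.length cs (k + 1)) (by omega) (by omega)]
      · simp only [if_neg hc]
        exact ih f2' (k + 1) (by omega) (by omega)
    · rw [pvRunsB_stop cs k hk, pvRunsB_stop cs k hk]

theorem pvRunsB_cstep (cs : List Char) (k : Nat) :
    pvRunsB cs.length cs k
      = if h : k < cs.length then
          (if cs[k] = '`' then
            (k, pvRunEndB cs.length cs (k + 1))
              :: pvRunsB cs.length cs (pvRunEndB cs.length cs (k + 1))
           else pvRunsB cs.length cs (k + 1))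
        else [] := by
  by_cases hk : k < cs.length
  · have h1 : pvRunsB cs.length cs k = pvRunsB ((cs.length - 1) + 1) cs k :=
      pvRunsB_irrel cs cs.length ((cs.length - 1) + 1) k (by omega) (by omega)
    rw [h1]
    simp only [pvRunsB, dif_pos hk]
    by_cases hc : cs[k]'hk = '`'
    · simp only [if_pos hc]
      have hge : k + 1 ≤ pvRunEndB cs.length cs (k + 1) := by
        rw [pvRunEndB_eq]; exact pvRunEndA_ge cs cs.length (k + 1)
      rw [pvRunsB_irrel cs (cs.length - 1) cs.length (pvRunEndB cs.length cs (k + 1))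
        (by omega) (by omega)]
    · simp only [if_neg hc]
      exact pvRunsB_irrel cs (cs.length - 1) cs.length (k + 1) (by omega) (by omega)
  · rw [pvRunsB_stop cs k hk, dif_neg hk]

theorem pvSearchB_len (L : Nat) (xs : List (Nat × Nat)) : ∀ (p : Nat × Nat)
    (rs : List (Nat × Nat)), pvSearchB L xs = some (p, rs) → rs.length < xs.length := by
  induction xs with
  | nil => intro p rs h; simp [pvSearchB] at h
  | cons hd tl ih =>
    intro p rs h
    obtain ⟨s2, e2⟩ := hd
    simp only [pvSearchB] at h
    split at h
    · exact Nat.lt_succ_of_lt (ih _ _ h)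
    · simp only [Option.some.injEq, Prod.mk.injEq] at h
      simp [← h.2]

theorem pvMatchB_irrel (cs : List Char) : ∀ (f1 f2 : Nat) (l : List (Nat × Nat)),
    l.length ≤ f1 → l.length ≤ f2 → pvMatchB f1 cs l = pvMatchB f2 cs l := by
  intro f1
  induction f1 with
  | zero =>
    intro f2 l h1 _
    have hl : l = [] := List.length_eq_zero_iff.mp (by omega)
    subst hl
    cases f2 with
    | zero => rfl
    | succ f2 => rfl
  | succ f1 ih =>
    intro f2 l h1 h2
    cases l with
    | nil =>
      cases f2 with
      | zero => rfl
      | succ f2 => rfl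
    | cons hd rest =>
      obtain ⟨s, e⟩ := hd
      have hlc : ((s, e) :: rest).length = rest.length + 1 := rfl
      obtain ⟨f2', rfl⟩ : ∃ m, f2 = m + 1 := ⟨f2 - 1, by omega⟩
      have h1' : rest.length ≤ f1 := by omega
      have h2' : rest.length ≤ f2' := by omega
      cases hse : pvSearchB (e - s) rest with
      | none =>
        simp only [pvMatchB, hse]
        exact ih f2' rest h1' h2'
      | some p =>
        obtain ⟨⟨s2, e2⟩, rs⟩ := p
        have hlen := pvSearchB_len (e - s) rest _ _ hse
        simp only [pvMatchB, hse]
        rw [ih f2' rs (by omega) (by omega)]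

theorem pvMatchB_cons_some (cs : List Char) (s e s2 e2 : Nat) (rest rs : List (Nat × Nat))
    (hse : pvSearchB (e - s) rest = some ((s2, e2), rs)) :
    pvMatchB ((s, e) :: rest).length cs ((s, e) :: rest)
      = ((s : Int), (e2 : Int), String.ofList (pvSlice cs e s2), String.ofList (pvSlice cs s e))
          :: pvMatchB rs.length cs rs := by
  have hlen := pvSearchB_len (e - s) rest _ _ hse
  simp only [List.length_cons, pvMatchB, hse]
  rw [pvMatchB_irrel cs rest.length rs.length rs (by omega) (by omega)]

theorem pvMatchB_cons_none (cs : List Char) (s e : Nat) (rest : List (Nat × Nat))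
    (hse : pvSearchB (e - s) rest = none) :
    pvMatchB ((s, e) :: rest).length cs ((s, e) :: rest) = pvMatchB rest.length cs rest := by
  simp only [List.length_cons, pvMatchB, hse]

theorem pvScanA_stop (cs : List Char) (i : Nat) (hk : ¬ i < cs.length) (f : Nat) :
    pvScanA f cs i = [] := by
  cases f with
  | zero => rfl
  | succ f => simp [pvScanA, hk]

theorem pvScanA_irrel (cs : List Char) : ∀ (f1 f2 i : Nat),
    cs.length - i ≤ f1 → cs.length - i ≤ f2 → pvScanA f1 cs i = pvScanA f2 cs i := by
  intro f1
  induction f1 with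
  | zero =>
    intro f2 i h1 _
    have hk : ¬ i < cs.length := by omega
    rw [pvScanA_stop cs i hk, pvScanA_stop cs i hk]
  | succ f1 ih =>
    intro f2 i h1 h2
    by_cases hk : i < cs.length
    · obtain ⟨f2', rfl⟩ : ∃ m, f2 = m + 1 := ⟨f2 - 1, by omega⟩
      by_cases hc : cs[i]'hk = '`'
      · have hcc : ¬ (cs[i]'hk ≠ '`') := by simpa using hc
        have hgt := pvRunEndA_gt cs i hk hc
        cases hf : pvFind cs.length cs (pvSlice cs i (pvRunEndA cs.length cs i)) i
            (pvRunEndA cs.length cs i) (pvRunEndA cs.length cs i) with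
        | none =>
          simp only [pvScanA, dif_pos hk, if_neg hcc, hf]
          exact ih f2' (pvRunEndA cs.length cs i) (by omega) (by omega)
        | some p =>
          obtain ⟨r, sp⟩ := p
          have hr := pvFind_gt cs (pvSlice cs i (pvRunEndA cs.length cs i)) i
            (pvRunEndA cs.length cs i) cs.length (pvRunEndA cs.length cs i) r sp
            (by omega) hf
          simp only [pvScanA, dif_pos hk, if_neg hcc, hf]
          rw [ih f2' r (by omega) (by omega)]
      · have hcc : cs[i]'hk ≠ '`' := by simpa using hc
        simp only [pvScanA, dif_pos hk, if_pos hcc]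
        exact ih f2' (i + 1) (by omega) (by omega)
    · rw [pvScanA_stop cs i hk, pvScanA_stop cs i hk]

theorem pvScanA_cstep (cs : List Char) (i : Nat) :
    pvScanA cs.length cs i
      = if h : i < cs.length then
          (if cs[i] ≠ '`' then pvScanA cs.length cs (i + 1)
           else
             match pvFind cs.length cs (pvSlice cs i (pvRunEndA cs.length cs i)) i
                 (pvRunEndA cs.length cs i) (pvRunEndA cs.length cs i) with
             | some (r, sp) => sp :: pvScanA cs.length cs r
             | none => pvScanA cs.length cs (pvRunEndA cs.length cs i))
        else [] := by
  by_cases hk : i < cs.length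
  · have h1 : pvScanA cs.length cs i = pvScanA ((cs.length - 1) + 1) cs i :=
      pvScanA_irrel cs cs.length ((cs.length - 1) + 1) i (by omega) (by omega)
    rw [h1]
    by_cases hc : cs[i]'hk = '`'
    · have hcc : ¬ (cs[i]'hk ≠ '`') := by simpa using hc
      have hgt := pvRunEndA_gt cs i hk hc
      cases hf : pvFind cs.length cs (pvSlice cs i (pvRunEndA cs.length cs i)) i
          (pvRunEndA cs.length cs i) (pvRunEndA cs.length cs i) with
      | none =>
        simp only [pvScanA, dif_pos hk, if_neg hcc, hf]
        exact pvScanA_irrel cs (cs.length - 1) cs.length (pvRunEndA cs.length cs i)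
          (by omega) (by omega)
      | some p =>
        obtain ⟨r, sp⟩ := p
        have hr := pvFind_gt cs (pvSlice cs i (pvRunEndA cs.length cs i)) i
          (pvRunEndA cs.length cs i) cs.length (pvRunEndA cs.length cs i) r sp
          (by omega) hf
        simp only [pvScanA, dif_pos hk, if_neg hcc, hf]
        rw [pvScanA_irrel cs (cs.length - 1) cs.length r (by omega) (by omega)]
    · have hcc : cs[i]'hk ≠ '`' := by simpa using hc
      simp only [pvScanA, dif_pos hk, if_pos hcc]
      exact pvScanA_irrel cs (cs.length - 1) cs.length (i + 1) (by omega) (by omega)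
  · rw [pvScanA_stop cs i hk, dif_neg hk]

theorem pvFind_eq_search (cs : List Char) (i j : Nat)
    (hd : pvSlice cs i j = List.replicate (j - i) '`') : ∀ (d k : Nat), cs.length - k ≤ d →
    match pvSearchB (j - i) (pvRunsB cs.length cs k) with
    | none => pvFind cs.length cs (pvSlice cs i j) i j k = none
    | some ((s2, e2), rs) =>
        pvFind cs.length cs (pvSlice cs i j) i j k
          = some (e2, ((i : Int), (e2 : Int), String.ofList (pvSlice cs j s2),
                        String.ofList (pvSlice cs i j)))
        ∧ rs = pvRunsB cs.length cs e2 ∧ k < e2 := by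
  intro d
  induction d with
  | zero =>
    intro k hk
    rw [pvRunsB_stop cs k (by omega)]
    simp only [pvSearchB]
    exact pvFind_stop cs (pvSlice cs i j) i j k (by omega) cs.length
  | succ d ih =>
    intro k hk
    by_cases h : k < cs.length
    · by_cases hc : cs[k]'h = '`'
      · have he : pvRunEndB cs.length cs (k + 1) = pvRunEndA cs.length cs k := by
          rw [pvRunEndB_eq]; exact (pvRunEndA_step cs k h hc).symm
        have hgt : k < pvRunEndA cs.length cs k := pvRunEndA_gt cs k h hc
        have hsl : pvSlice cs k (pvRunEndA cs.length cs k)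
            = List.replicate (pvRunEndA cs.length cs k - k) '`' :=
          pvSlice_runEnd cs cs.length k (by omega)
        have hfind : pvFind cs.length cs (pvSlice cs i j) i j k
            = if pvSlice cs k (pvRunEndA cs.length cs k) = pvSlice cs i j then
                some (pvRunEndA cs.length cs k,
                  ((i : Int), ((pvRunEndA cs.length cs k : Nat) : Int),
                    String.ofList (pvSlice cs j k), String.ofList (pvSlice cs i j)))
              else pvFind cs.length cs (pvSlice cs i j) i j (pvRunEndA cs.length cs k) := by
          rw [pvFind_cstep, dif_pos h, if_neg (show ¬ (cs[k]'h ≠ '`') from by simpa using hc)]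
        rw [pvRunsB_cstep, dif_pos h, if_pos hc, he]
        simp only [pvSearchB]
        by_cases hlen : pvRunEndA cs.length cs k - k = j - i
        · rw [if_neg (show ¬ (pvRunEndA cs.length cs k - k ≠ j - i) from by omega)]
          have hsleq : pvSlice cs k (pvRunEndA cs.length cs k) = pvSlice cs i j := by
            rw [hsl, hd, pvReplicate_inj]; exact hlen
          change _ ∧ _ ∧ _
          refine ⟨?_, rfl, hgt⟩
          rw [hfind, if_pos hsleq]
        · have hslne : pvSlice cs k (pvRunEndA cs.length cs k) ≠ pvSlice cs i j := by
            rw [hsl, hd, Ne, pvReplicate_inj]; exact hlen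
          rw [if_pos hlen]
          have ih' := ih (pvRunEndA cs.length cs k) (by omega)
          cases hse : pvSearchB (j - i) (pvRunsB cs.length cs (pvRunEndA cs.length cs k)) with
          | none =>
            rw [hse] at ih'
            rw [hfind, if_neg hslne]
            exact ih'
          | some p =>
            obtain ⟨⟨s2, e2⟩, rs⟩ := p
            rw [hse] at ih'
            obtain ⟨ih1, ih2, ih3⟩ := ih'
            refine ⟨?_, ih2, by omega⟩
            rw [hfind, if_neg hslne]
            exact ih1
      · have hstep : pvFind cs.length cs (pvSlice cs i j) i j k
            = pvFind cs.length cs (pvSlice cs i j) i j (k + 1) := by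
          rw [pvFind_cstep, dif_pos h, if_pos (show cs[k]'h ≠ '`' from by simpa using hc)]
        rw [pvRunsB_cstep, dif_pos h, if_neg hc]
        have ih' := ih (k + 1) (by omega)
        cases hse : pvSearchB (j - i) (pvRunsB cs.length cs (k + 1)) with
        | none =>
          rw [hse] at ih'
          rw [hstep]
          exact ih'
        | some p =>
          obtain ⟨⟨s2, e2⟩, rs⟩ := p
          rw [hse] at ih'
          obtain ⟨ih1, ih2, ih3⟩ := ih'
          exact ⟨by rw [hstep]; exact ih1, ih2, by omega⟩
    · rw [pvRunsB_stop cs k h]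
      simp only [pvSearchB]
      exact pvFind_stop cs (pvSlice cs i j) i j k h cs.length

theorem pvScanA_eq_matchB (cs : List Char) : ∀ (d i : Nat), cs.length - i ≤ d →
    pvScanA cs.length cs i
      = pvMatchB (pvRunsB cs.length cs i).length cs (pvRunsB cs.length cs i) := by
  intro d
  induction d with
  | zero =>
    intro i hi
    rw [pvScanA_stop cs i (by omega), pvRunsB_stop cs i (by omega)]
    rfl
  | succ d ih =>
    intro i hi
    by_cases h : i < cs.length
    · by_cases hc : cs[i]'h = '`'
      · have hcc : ¬ (cs[i]'h ≠ '`') := by simpa using hc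
        have he : pvRunEndB cs.length cs (i + 1) = pvRunEndA cs.length cs i := by
          rw [pvRunEndB_eq]; exact (pvRunEndA_step cs i h hc).symm
        have hgt : i < pvRunEndA cs.length cs i := pvRunEndA_gt cs i h hc
        have hruns : pvRunsB cs.length cs i
            = (i, pvRunEndA cs.length cs i)
                :: pvRunsB cs.length cs (pvRunEndA cs.length cs i) := by
          rw [pvRunsB_cstep, dif_pos h, if_pos hc, he]
        have hspec := pvFind_eq_search cs i (pvRunEndA cs.length cs i)
          (pvSlice_runEnd cs cs.length i (by omega)) cs.length (pvRunEndA cs.length cs i)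
          (by omega)
        rw [pvScanA_cstep, dif_pos h, if_neg hcc, hruns]
        cases hse : pvSearchB (pvRunEndA cs.length cs i - i)
            (pvRunsB cs.length cs (pvRunEndA cs.length cs i)) with
        | none =>
          rw [hse] at hspec
          simp only [hspec]
          rw [pvMatchB_cons_none cs i (pvRunEndA cs.length cs i) _ hse]
          exact ih (pvRunEndA cs.length cs i) (by omega)
        | some p =>
          obtain ⟨⟨s2, e2⟩, rs⟩ := p
          rw [hse] at hspec
          obtain ⟨h1, h2, h3⟩ := hspec
          simp only [h1]
          rw [pvMatchB_cons_some cs i (pvRunEndA cs.length cs i) s2 e2 _ rs hse]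
          rw [ih e2 (by omega), h2]
      · have hcc : cs[i]'h ≠ '`' := by simpa using hc
        have hruns : pvRunsB cs.length cs i = pvRunsB cs.length cs (i + 1) := by
          rw [pvRunsB_cstep, dif_pos h, if_neg hc]
        rw [pvScanA_cstep, dif_pos h, if_pos hcc, hruns]
        exact ih (i + 1) (by omega)
    · rw [pvScanA_stop cs i h, pvRunsB_stop cs i h]
      rfl

-- ===== VERDICT (by name: the statement is the Claim_ definition above) =====
theorem iter_inline_code_spans_spec : Claim_equal_iter_inline_code_spans := by
  intro line _
  unfold Spec_iter_inline_code_spans iter_inline_code_spans iter_inline_code_spans_alt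
  exact pvScanA_eq_matchB line.toList line.toList.length 0 (by omega)
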